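-- pv_equiv track=rewrite | github.com/SallocinAvalcante/OSINTMonki | modules/network/traceroute.py | check_completed
-- ===== SOURCE A (Python) =====
-- from typing import List, Dict
--
-- def check_completed(target_ip: str, hops: List[Dict]) -> bool:
--     if not hops:
--         return False
--
--     for hop in reversed(hops):
--         ip = hop.get("ip")
--         if ip and ip != "*":
--             return ip == target_ip
--
--     return False
-- ===== SOURCE B (Python) =====
-- def check_completed(target_ip, hops):
--     valid = [h.get("ip") for h in hops if h.get("ip") and h.get("ip") != "*"]
--     return valid[-1] == target_ip if valid else False
-- ===== Notes on version B (the rewrite author's own statement) =====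
-- stated objective: simpler
-- what changed: Replaces the reversed-iteration early-return loop with a forward comprehension that collects all valid hop ips and a single comparison of the last one against the target.
import Mathlib
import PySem

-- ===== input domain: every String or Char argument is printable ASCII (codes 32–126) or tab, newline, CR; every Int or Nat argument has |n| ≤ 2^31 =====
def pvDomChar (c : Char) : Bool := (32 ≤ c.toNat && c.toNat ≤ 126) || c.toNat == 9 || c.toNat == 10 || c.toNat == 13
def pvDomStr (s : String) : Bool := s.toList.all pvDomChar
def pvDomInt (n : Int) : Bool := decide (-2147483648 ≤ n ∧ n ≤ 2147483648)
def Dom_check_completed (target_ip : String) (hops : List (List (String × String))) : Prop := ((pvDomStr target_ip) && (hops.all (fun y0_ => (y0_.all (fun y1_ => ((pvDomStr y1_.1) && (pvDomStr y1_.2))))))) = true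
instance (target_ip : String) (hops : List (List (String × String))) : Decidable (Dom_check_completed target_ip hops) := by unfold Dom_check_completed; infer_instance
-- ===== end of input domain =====

-- B rewrites A's reversed early-return loop as a forward comprehension collecting the valid ips plus one final comparison (objective: simpler).


-- ===== PORT A =====
-- A-side: the "for hop in reversed(hops)" loop with early return
def chkLoopA (target_ip : String) (l : List (List (String × String))) : Bool :=
  match l with
  | [] => false
  | hop :: rest =>
    match (PySem.Dict.mk hop).get? "ip" with
    | some ip => if ip != "" && ip != "*" then ip == target_ip else chkLoopA target_ip rest
    | none => chkLoopA target_ip rest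

def check_completed (target_ip : String) (hops : List (List (String × String))) : Bool :=
  if hops.isEmpty then false
  else chkLoopA target_ip hops.reverse

-- ===== PORT B =====
-- B-side: the filter the comprehension performs on each hop
def validIp (hop : List (String × String)) : Option String :=
  match (PySem.Dict.mk hop).get? "ip" with
  | some ip => if ip != "" && ip != "*" then some ip else none
  | none => none

def check_completed_alt (target_ip : String) (hops : List (List (String × String))) : Bool :=
  let valid := hops.filterMap validIp
  -- `valid[-1] == target_ip if valid else False`: valid[-1] is exact here since the
  -- comparison is guarded by `if valid`
  match valid.getLast? with
  | some ip => ip == target_ip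
  | none => false

-- ===== PRECONDITION & SPEC =====
def Spec_check_completed (target_ip : String) (hops : List (List (String × String))) (out : Bool) : Prop := out = check_completed_alt target_ip hops
instance (target_ip : String) (hops : List (List (String × String))) (out : Bool) : Decidable (Spec_check_completed target_ip hops out) := by unfold Spec_check_completed; infer_instance

-- ===== CLAIM (what is proved, stated in full; the proofs are below) =====
def Claim_equal_check_completed : Prop := ∀ (target_ip : String) (hops : List (List (String × String))), Dom_check_completed target_ip hops → Spec_check_completed target_ip hops (check_completed target_ip hops)

-- ===== LEMMAS AND PROOFS =====
-- A's reverse loop returns the comparison for the FIRST valid ip of its argument,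
-- i.e. the head of the filtered list.
theorem chkLoopA_cons (t : String) (hop : List (String × String))
    (rest : List (List (String × String))) :
    chkLoopA t (hop :: rest) = (match validIp hop with
                                | some ip => ip == t
                                | none => chkLoopA t rest) := by
  show (match (PySem.Dict.mk hop).get? "ip" with
        | some ip => if ip != "" && ip != "*" then ip == t else chkLoopA t rest
        | none => chkLoopA t rest) = _
  unfold validIp
  cases (PySem.Dict.mk hop).get? "ip" with
  | none => rfl
  | some ip =>
    by_cases hv : (¬ip = "" ∧ ¬ip = "*")
    · simp [hv]
    · simp [hv]

-- A's reverse loop returns the comparison for the FIRST valid ip of its argument,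
-- i.e. the head of the filtered list.
theorem chkLoopA_eq_head (t : String) (l : List (List (String × String))) :
    chkLoopA t l = (match (l.filterMap validIp).head? with
                    | some ip => ip == t
                    | none => false) := by
  induction l with
  | nil => simp [chkLoopA]
  | cons hop rest ih =>
    rw [chkLoopA_cons, List.filterMap_cons]
    cases hv : validIp hop with
    | none => simpa using ih
    | some ip => simp

-- ===== VERDICT (by name: the statement is the Claim_ definition above) =====
theorem check_completed_spec : Claim_equal_check_completed := by
  intro target_ip hops _
  unfold Spec_check_completed check_completed check_completed_alt
  rw [chkLoopA_eq_head, List.filterMap_reverse, List.head?_reverse]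
  cases hops with
  | nil => rfl
  | cons h rest => simp
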